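-- pv_equiv track=rewrite | github.com/mm0806son/FlowSentry-Wake | axelera/app/statistics.py | _find_aipu_element
-- ===== SOURCE A (Python) =====
-- def _find_aipu_element(elements, prefix="inference-"):
--     """
--     Find the index of the first element that starts with the specified prefix.
--     """
--
--     for ix, name in enumerate(elements):
--         if name.endswith(':inference'):
--             return ix
--     for ix, name in enumerate(elements):
--         if name.startswith(prefix) and ':' not in name:
--             return ix
--     raise ValueError(f"No element starting with '{prefix}' found.")
-- ===== SOURCE B (Python) =====
-- def _find_aipu_element(elements, prefix="inference-"):
--     """Single pass: ':inference' wins immediately; otherwise remember first prefix match."""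
--     candidate = None
--     for ix, name in enumerate(elements):
--         if name.endswith(':inference'):
--             return ix
--         if candidate is None and name.startswith(prefix) and ':' not in name:
--             candidate = ix
--     if candidate is not None:
--         return candidate
--     raise ValueError(f"No element starting with '{prefix}' found.")
-- ===== Notes on version B (the rewrite author's own statement) =====
-- stated objective: alternative
-- what changed: Replaced A's two sequential scans of the list by a single enumerate pass carrying a 'first prefix match' candidate; ':inference' still wins by returning immediately.
import Mathlib
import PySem

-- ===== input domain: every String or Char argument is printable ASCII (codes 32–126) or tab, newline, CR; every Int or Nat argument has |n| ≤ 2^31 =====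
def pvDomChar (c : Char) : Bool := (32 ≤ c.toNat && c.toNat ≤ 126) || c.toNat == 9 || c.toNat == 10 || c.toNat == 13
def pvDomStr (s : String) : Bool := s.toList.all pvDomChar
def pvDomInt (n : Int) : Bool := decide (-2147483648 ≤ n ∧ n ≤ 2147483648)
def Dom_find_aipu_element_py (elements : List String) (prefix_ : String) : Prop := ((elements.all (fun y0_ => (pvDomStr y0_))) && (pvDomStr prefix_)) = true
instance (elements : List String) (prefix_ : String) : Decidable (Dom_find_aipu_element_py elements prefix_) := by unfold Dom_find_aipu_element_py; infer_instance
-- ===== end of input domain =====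

-- B merges A's two scans into one pass with a carried first-prefix-match candidate (alternative decomposition, same cost).

-- ===== PORT A =====
-- first loop: first element ending with ':inference'
def pvScanInf : List String → Int → Option Int
  | [], _ => none
  | n :: rest, ix =>
    if PySem.Str.endswith n ":inference" then some ix else pvScanInf rest (ix + 1)

-- second loop: first element starting with prefix and not containing ':'
def pvScanPref (prefix_ : String) : List String → Int → Option Int
  | [], _ => none
  | n :: rest, ix =>
    if PySem.Str.startswith n prefix_ && !PySem.Str.isIn ":" n then some ix
    else pvScanPref prefix_ rest (ix + 1)

def find_aipu_element_py (elements : List String) (prefix_ : String) : Int :=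
  match pvScanInf elements 0 with
  | some i => i
  | none =>
    match pvScanPref prefix_ elements 0 with
    | some i => i
    | none => -1  -- Python raises ValueError here; excluded by Pre_

-- ===== PORT B =====
-- single pass carrying the first prefix-match candidate; ':inference' returns immediately
def pvLoopB (prefix_ : String) : List String → Int → Option Int → Option Int
  | [], _, cand => cand
  | n :: rest, ix, cand =>
    if PySem.Str.endswith n ":inference" then some ix
    else if cand.isNone && (PySem.Str.startswith n prefix_ && !PySem.Str.isIn ":" n) then
      pvLoopB prefix_ rest (ix + 1) (some ix)
    else pvLoopB prefix_ rest (ix + 1) cand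

def find_aipu_element_py_alt (elements : List String) (prefix_ : String) : Int :=
  match pvLoopB prefix_ elements 0 none with
  | some i => i
  | none => -1  -- Python raises ValueError here; excluded by Pre_

-- ===== PRECONDITION & SPEC =====
-- Pre_ excludes exactly the inputs on which A (and B) raise ValueError: no matching element.
def Pre_find_aipu_element_py (elements : List String) (prefix_ : String) : Prop :=
  ∃ n ∈ elements, PySem.Str.endswith n ":inference" = true ∨
    (PySem.Str.startswith n prefix_ = true ∧ PySem.Str.isIn ":" n = false)
instance (elements : List String) (prefix_ : String) : Decidable (Pre_find_aipu_element_py elements prefix_) := by unfold Pre_find_aipu_element_py; infer_instance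

def pvWitness_find_aipu_element_py : List String × String := (["x", "inference-0"], "inference-")

def Spec_find_aipu_element_py (elements : List String) (prefix_ : String) (out : Int) : Prop := out = find_aipu_element_py_alt elements prefix_
instance (elements : List String) (prefix_ : String) (out : Int) : Decidable (Spec_find_aipu_element_py elements prefix_ out) := by unfold Spec_find_aipu_element_py; infer_instance

-- ===== CLAIM (what is proved, stated in full; the proofs are below) =====
def Claim_equal_find_aipu_element_py : Prop := ∀ (elements : List String) (prefix_ : String), Dom_find_aipu_element_py elements prefix_ → Pre_find_aipu_element_py elements prefix_ → Spec_find_aipu_element_py elements prefix_ (find_aipu_element_py elements prefix_)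

-- ===== LEMMAS AND PROOFS =====
theorem pvLoopB_eq (prefix_ : String) (l : List String) :
    ∀ (ix : Int) (cand : Option Int),
      pvLoopB prefix_ l ix cand =
        match pvScanInf l ix with
        | some i => some i
        | none =>
          match cand with
          | some c => some c
          | none => pvScanPref prefix_ l ix := by
  induction l with
  | nil => intro ix cand; cases cand <;> simp [pvLoopB, pvScanInf, pvScanPref]
  | cons n rest ih =>
    intro ix cand
    cases cand with
    | none =>
      simp only [pvLoopB, pvScanInf, pvScanPref, Option.isNone_none, Bool.true_and]
      split_ifs with h1 h2 h2 <;> simp_all [ih]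
    | some c =>
      simp only [pvLoopB, pvScanInf, pvScanPref, Option.isNone_some, Bool.false_and,
        Bool.false_eq_true, if_false]
      split_ifs with h1 <;> simp_all [ih]

-- ===== VERDICT (by name: the statement is the Claim_ definition above) =====
theorem find_aipu_element_py_spec : Claim_equal_find_aipu_element_py := by
  intro elements prefix_ _ _
  unfold Spec_find_aipu_element_py find_aipu_element_py find_aipu_element_py_alt
  rw [pvLoopB_eq]
  cases pvScanInf elements 0 <;> simp
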